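-- pv_equiv track=rewrite | github.com/raj-jaiswal/Newst | allthenews_cleanup.py | pick_cols
-- ===== SOURCE A (Python) =====
-- def pick_cols(cols):
--     title = next((c for c in cols if "title" in c.lower()), None)
--     content = next((c for c in cols if any(k in c.lower() for k in ("content", "article", "text"))), None)
--     if title is None and len(cols) >= 3:
--         title = cols[2]
--     if content is None:
--         content = cols[-1]
--     return title, content
-- ===== SOURCE B (Python) =====
-- def pick_cols(cols):
--     # Build the answer back-to-front: start from the fallback values and let
--     # earlier (leftward) matches overwrite later ones, so the leftmost match wins.
--     title = cols[2] if len(cols) >= 3 else None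
--     content = cols[-1]
--     for c in reversed(cols):
--         lc = c.lower()
--         if "title" in lc:
--             title = c
--         if "content" in lc or "article" in lc or "text" in lc:
--             content = c
--     return title, content
-- ===== Notes on version B (the rewrite author's own statement) =====
-- stated objective: alternative
-- what changed: Instead of two independent first-match scans plus post-loop fallbacks, B constructs the result back-to-front: the fallbacks (cols[2], cols[-1]) seed the accumulator and a single reverse traversal unconditionally overwrites each field on a keyword match, so the leftmost match wins without any None checks or post-processing.
import Mathlib
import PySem

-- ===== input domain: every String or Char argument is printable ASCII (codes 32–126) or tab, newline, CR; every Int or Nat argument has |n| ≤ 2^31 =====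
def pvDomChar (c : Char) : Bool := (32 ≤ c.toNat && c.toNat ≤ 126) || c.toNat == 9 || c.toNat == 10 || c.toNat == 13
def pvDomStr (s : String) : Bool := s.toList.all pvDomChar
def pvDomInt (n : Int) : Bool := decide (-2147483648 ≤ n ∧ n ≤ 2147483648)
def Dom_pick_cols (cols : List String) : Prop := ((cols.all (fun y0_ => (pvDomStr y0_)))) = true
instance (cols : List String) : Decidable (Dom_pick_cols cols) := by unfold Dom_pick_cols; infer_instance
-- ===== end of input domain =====

-- B builds the result back-to-front: fallbacks seed the accumulator, a reverse pass
-- overwrites on each match so the leftmost match wins; no None checks, no post-fixups.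

-- ===== PORT A =====
def pick_cols (cols : List String) : Option String × Option String :=
  let title := cols.find? (fun c => PySem.Str.isIn "title" (PySem.Str.lower c))
  let content := cols.find? (fun c =>
    ["content", "article", "text"].any (fun k => PySem.Str.isIn k (PySem.Str.lower c)))
  let title := if title = none ∧ cols.length ≥ 3 then PySem.List.pyGet? cols 2 else title
  let content := if content = none then PySem.List.pyGet? cols (-1) else content
  (title, content)

-- ===== PORT B =====
def pick_cols_alt (cols : List String) : Option String × Option String :=
  let init : Option String × Option String :=
    (if cols.length ≥ 3 then PySem.List.pyGet? cols 2 else none, PySem.List.pyGet? cols (-1))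
  cols.reverse.foldl (fun tc c =>
    let lc := PySem.Str.lower c
    (if PySem.Str.isIn "title" lc then some c else tc.1,
     if PySem.Str.isIn "content" lc || PySem.Str.isIn "article" lc || PySem.Str.isIn "text" lc
       then some c else tc.2)) init

-- ===== PRECONDITION & SPEC =====
-- Pre_ excludes only the empty list, on which Python A raises IndexError at cols[-1].
def Pre_pick_cols (cols : List String) : Prop := cols ≠ []
instance (cols : List String) : Decidable (Pre_pick_cols cols) := by unfold Pre_pick_cols; infer_instance
def pvWitness_pick_cols : List String := ["id", "Title", "body text"]
def Spec_pick_cols (cols : List String) (out : Option String × Option String) : Prop := out = pick_cols_alt cols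
instance (cols : List String) (out : Option String × Option String) : Decidable (Spec_pick_cols cols out) := by unfold Spec_pick_cols; infer_instance

-- ===== CLAIM =====
def Claim_equal_pick_cols : Prop := ∀ (cols : List String), Dom_pick_cols cols → Pre_pick_cols cols → Spec_pick_cols cols (pick_cols cols)

-- ===== LEMMAS AND PROOFS =====

-- the reverse overwrite-fold equals the first-match scan with the seed as fallback
theorem revfold_eq (cols : List String) (init : Option String × Option String)
    (pT pC : String → Bool) :
    cols.reverse.foldl (fun tc c =>
      ((if pT c then some c else tc.1), (if pC c then some c else tc.2))) init =
    ((cols.find? pT).orElse (fun _ => init.1), (cols.find? pC).orElse (fun _ => init.2)) := by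
  induction cols generalizing init with
  | nil => simp
  | cons x xs ih =>
    simp only [List.reverse_cons, List.foldl_append, List.foldl_cons, List.foldl_nil,
      List.find?]
    rw [ih]
    by_cases h1 : pT x <;> by_cases h2 : pC x <;> simp [h1, h2, Option.orElse]

-- ===== VERDICT =====
theorem pick_cols_spec : Claim_equal_pick_cols := by
  intro cols _ _
  unfold Spec_pick_cols pick_cols pick_cols_alt
  rw [show (fun (tc : Option String × Option String) (c : String) =>
      let lc := PySem.Str.lower c
      ((if PySem.Str.isIn "title" lc then some c else tc.1),
       (if PySem.Str.isIn "content" lc || PySem.Str.isIn "article" lc || PySem.Str.isIn "text" lc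
         then some c else tc.2))) =
    (fun tc c =>
      ((if (fun c => PySem.Str.isIn "title" (PySem.Str.lower c)) c then some c else tc.1),
       (if (fun c => ["content", "article", "text"].any
            (fun k => PySem.Str.isIn k (PySem.Str.lower c))) c then some c else tc.2)))
    from by funext tc c; simp [List.any, or_assoc]]
  rw [revfold_eq]
  cases hT : cols.find? (fun c => PySem.Str.isIn "title" (PySem.Str.lower c)) <;>
  cases hC : cols.find? (fun c => ["content", "article", "text"].any
      (fun k => PySem.Str.isIn k (PySem.Str.lower c))) <;>
    simp [Option.orElse]
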